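-- pv_equiv track=rewrite | github.com/christianebacani/Roadmap | Coding Challenges using Python and SQL/Code Wars Python Solved Problems/6 Kyu/encrypt_this.py | encrypt_this
-- ===== SOURCE A (Python) =====
-- def encrypt_this(text: str) -> str:
--     text = text.split()
--     encrypted_text = []
--
--     for i in range(len(text)):
--         word = list(text[i])
--         encrypted_word = []
--
--         for j in range(len(word)):
--             if j == 0:
--                 encrypted_word.append(str(ord(word[j])))
--
--             elif j == 1:
--                 encrypted_word.append(word[-1])
--
--             elif j == len(word) - 1:
--                 encrypted_word.append(word[1])
--
--             else:
--                 encrypted_word.append(word[j])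
--
--         encrypted_text.append(''.join(encrypted_word))
--
--     return ' '.join(encrypted_text)
-- ===== SOURCE B (Python) =====
-- def encrypt_this(text: str) -> str:
--     # Closed-form per word: pure slicing concatenation, no list mutation, no per-char loop.
--     return ' '.join(
--         str(ord(w[0])) + (w[-1] + w[2:-1] + w[1] if len(w) > 2 else w[1:])
--         for w in text.split())
-- ===== Notes on version B (the rewrite author's own statement) =====
-- stated objective: simpler
-- what changed: B computes each encrypted word as a closed-form concatenation of string slices (str(ord(w[0])) + w[-1] + w[2:-1] + w[1]) inside a single join-over-generator one-liner, eliminating A's per-character loop with four positional branches and its intermediate list building entirely.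
import Mathlib
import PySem

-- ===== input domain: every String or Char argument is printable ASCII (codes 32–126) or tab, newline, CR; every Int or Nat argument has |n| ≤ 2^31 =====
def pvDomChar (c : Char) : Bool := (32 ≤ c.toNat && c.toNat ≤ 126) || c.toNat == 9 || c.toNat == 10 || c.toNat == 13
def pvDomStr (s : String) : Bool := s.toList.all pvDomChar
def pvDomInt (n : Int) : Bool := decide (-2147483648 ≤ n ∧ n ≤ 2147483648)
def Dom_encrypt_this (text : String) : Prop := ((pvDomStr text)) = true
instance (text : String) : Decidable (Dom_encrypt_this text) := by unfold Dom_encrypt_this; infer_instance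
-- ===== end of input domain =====

-- B replaces A's four-branch per-character loop with a closed-form slice concatenation per word (same cost, simpler).


-- ===== PORT A =====
-- the body of A's inner loop: which string gets appended for index j of word w
def encCharA (w : List Char) (j : Int) : List Char :=
  if j = 0 then PySem.Int.toChars ((PySem.List.pyGetD w j ' ').toNat : Int)
  else if j = 1 then [PySem.List.pyGetD w (-1) ' ']
  else if j = (w.length : Int) - 1 then [PySem.List.pyGetD w 1 ' ']
  else [PySem.List.pyGetD w j ' ']

-- A's inner loop: encrypted_word as the list of appended pieces
def encWordA (w : List Char) : List (List Char) :=
  (PySem.List.pyRange 0 (w.length : Int) 1).foldl (fun acc j => acc ++ [encCharA w j]) []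

def encrypt_this (text : String) : String :=
  PySem.Str.join " "
    ((PySem.Str.split₀ text).foldl
      (fun acc word => acc ++ [String.ofList (PySem.Chars.join [] (encWordA word.toList))]) [])

-- ===== PORT B =====
-- B per word: str(ord(w[0])) + (w[-1] + w[2:-1] + w[1] if len(w) > 2 else w[1:])
def encWordB (w : List Char) : List Char :=
  match w with
  | [] => []  -- unreachable: split() never yields an empty word (totalization guard)
  | c :: rest =>
    PySem.Int.toChars ((c.toNat : Int)) ++
      (if 2 < (c :: rest).length then
        [PySem.List.pyGetD (c :: rest) (-1) ' ']
          ++ PySem.List.slice (c :: rest) (some 2) (some (-1))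
          ++ [PySem.List.pyGetD (c :: rest) 1 ' ']
      else PySem.List.slice (c :: rest) (some 1) none)

def encrypt_this_alt (text : String) : String :=
  PySem.Str.join " " ((PySem.Str.split₀ text).map (fun word => String.ofList (encWordB word.toList)))

-- ===== PRECONDITION & SPEC =====
def Spec_encrypt_this (text : String) (out : String) : Prop := out = encrypt_this_alt text
instance (text : String) (out : String) : Decidable (Spec_encrypt_this text out) := by unfold Spec_encrypt_this; infer_instance

-- ===== CLAIM =====
def Claim_equal_encrypt_this : Prop := ∀ (text : String), Dom_encrypt_this text → Spec_encrypt_this text (encrypt_this text)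

-- ===== LEMMAS AND PROOFS =====

-- ''.join is concatenation
lemma joinNil (l : List (List Char)) : PySem.Chars.join [] l = l.flatten := by
  induction l with
  | nil => simp [PySem.Chars.join_nil]
  | cons p rest ih =>
    cases rest with
    | nil => simp [PySem.Chars.join_singleton]
    | cons q r =>
      rw [PySem.Chars.join_cons_cons]
      simp [ih]

lemma pyGetD_one_cons (a b : Char) (xs : List Char) (d : Char) :
    PySem.List.pyGetD (a :: b :: xs) 1 d = b := by
  simp [PySem.List.pyGetD]

-- the middle of A's loop reads the word's middle characters in order
lemma mapMid (a b z : Char) (mid : List Char) :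
    (PySem.List.pyRange 2 (2 + (mid.length : Int)) 1).map
      (fun j => PySem.List.pyGetD (a :: b :: (mid ++ [z])) j ' ') = mid := by
  rw [PySem.List.pyRange_one]
  have hlen : (2 + (mid.length : Int) - 2).toNat = mid.length := by omega
  rw [hlen]
  apply List.ext_getElem
  · simp
  · intro i h1 h2
    simp only [List.getElem_map, List.getElem_range]
    have : (2 : Int) + (i : Int) = ((2 + i : Nat) : Int) := by push_cast; ring
    rw [this, PySem.List.pyGetD_natCast]
    simp at h2
    rw [List.getD_eq_getElem _ _ (by simp; omega)]
    have hq : (a :: b :: (mid ++ [z]))[2+i]? = some mid[i] := by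
      rw [show 2+i = i+1+1 from by omega]
      rw [List.getElem?_cons_succ, List.getElem?_cons_succ, List.getElem?_append_left h2,
        List.getElem?_eq_getElem h2]
    rw [List.getElem?_eq_getElem (by simp; omega : 2+i < (a :: b :: (mid ++ [z])).length)] at hq
    exact Option.some_injective _ hq

lemma flattenSingl (mid : List Char) : (List.map (fun c => [c]) mid).flatten = mid := by
  induction mid with
  | nil => rfl
  | cons c r ih => simp [ih]

-- xs[2:-1] on a word a::b::mid++[z] is exactly mid
lemma sliceMid (a b z : Char) (mid : List Char) :
    PySem.List.slice (a :: b :: (mid ++ [z])) (some 2) (some (-1)) = mid := by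
  simp [PySem.List.slice]

-- per-word agreement of the two programs
lemma word_eq (w : List Char) :
    PySem.Chars.join [] (encWordA w) = encWordB w := by
  match w with
  | [] => rfl
  | [a] => with_unfolding_all rfl
  | a :: b :: rest =>
    rcases List.eq_nil_or_concat rest with rfl | ⟨mid, z, rfl⟩
    · with_unfolding_all rfl
    · simp only [List.concat_eq_append]
      have hn : ((a :: b :: (mid ++ [z])).length : Int) = (mid.length : Int) + 3 := by
        simp; ring
      -- A side
      have hrange : PySem.List.pyRange 0 ((mid.length : Int) + 3) 1
          = 0 :: 1 :: (PySem.List.pyRange 2 ((mid.length : Int) + 2) 1 ++ [(mid.length : Int) + 2]) := by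
        rw [PySem.List.pyRange_one_cons (by omega), PySem.List.pyRange_one_cons (by omega)]
        norm_num
        rw [show (mid.length : Int) + 3 = ((mid.length : Int) + 2) + 1 by ring,
          PySem.List.pyRange_one_succ_right (by omega)]
      have hA : encWordA (a :: b :: (mid ++ [z]))
          = encCharA (a :: b :: (mid ++ [z])) 0 :: encCharA (a :: b :: (mid ++ [z])) 1 ::
            ((PySem.List.pyRange 2 ((mid.length : Int) + 2) 1).map (encCharA (a :: b :: (mid ++ [z])))
              ++ [encCharA (a :: b :: (mid ++ [z])) ((mid.length : Int) + 2)]) := by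
        rw [encWordA, PySem.List.foldl_append_singleton_eq_map, hn, hrange]
        simp only [List.map_cons, List.map_append, List.map_nil, List.nil_append]
      have hg0 : encCharA (a :: b :: (mid ++ [z])) 0 = PySem.Int.toChars ((a.toNat : Int)) := by
        simp [encCharA, PySem.List.pyGetD_zero_cons]
      have hg1 : encCharA (a :: b :: (mid ++ [z])) 1 = [z] := by
        rw [encCharA, if_neg (by norm_num), if_pos rfl,
          show a :: b :: (mid ++ [z]) = (a :: b :: mid) ++ [z] by simp,
          PySem.List.pyGetD_neg_one_append_singleton]
      have hglast : encCharA (a :: b :: (mid ++ [z])) ((mid.length : Int) + 2) = [b] := by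
        rw [encCharA, hn]
        rw [if_neg (by omega), if_neg (by omega), if_pos (by ring)]
        rw [pyGetD_one_cons]
      have hgmid : (PySem.List.pyRange 2 ((mid.length : Int) + 2) 1).map
          (encCharA (a :: b :: (mid ++ [z]))) = mid.map (fun c => [c]) := by
        have hcongr : (PySem.List.pyRange 2 ((mid.length : Int) + 2) 1).map
            (encCharA (a :: b :: (mid ++ [z])))
            = (PySem.List.pyRange 2 ((mid.length : Int) + 2) 1).map
              (fun j => [PySem.List.pyGetD (a :: b :: (mid ++ [z])) j ' ']) := by
          apply List.map_congr_left
          intro j hj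
          rw [PySem.List.mem_pyRange_one] at hj
          rw [encCharA, hn, if_neg (by omega), if_neg (by omega), if_neg (by omega)]
        rw [hcongr, show (fun j => [PySem.List.pyGetD (a :: b :: (mid ++ [z])) j ' '])
              = (fun c => [c]) ∘ (fun j => PySem.List.pyGetD (a :: b :: (mid ++ [z])) j ' ') from rfl,
          ← List.map_map, show ((mid.length : Int) + 2) = 2 + (mid.length : Int) by ring, mapMid]
      -- B side
      have hB : encWordB (a :: b :: (mid ++ [z]))
          = PySem.Int.toChars ((a.toNat : Int)) ++ ([z] ++ mid ++ [b]) := by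
        rw [encWordB]
        simp only [if_pos (by simp : 2 < (a :: b :: (mid ++ [z])).length)]
        have hget1 : PySem.List.pyGetD (a :: b :: (mid ++ [z])) (-1) ' ' = z := by
          have : a :: b :: (mid ++ [z]) = (a :: b :: mid) ++ [z] := by simp
          rw [this, PySem.List.pyGetD_neg_one_append_singleton]
        rw [hget1, pyGetD_one_cons, sliceMid]
      rw [hA, hB, joinNil]
      simp [hg0, hg1, hglast, hgmid, flattenSingl]

-- ===== VERDICT =====
theorem encrypt_this_spec : Claim_equal_encrypt_this := by
  intro text _
  unfold Spec_encrypt_this encrypt_this encrypt_this_alt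
  simp only [PySem.List.foldl_append_singleton_eq_map, List.nil_append]
  congr 1
  apply List.map_congr_left
  intro word _
  rw [word_eq]
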